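-- pv_equiv track=rewrite | github.com/gtu-homeworks-and-projects/CSE-321-Introduction-to-Algorithm-Design-2018-Fall | HW5/part2.py | incorrectAnswer
-- ===== SOURCE A (Python) =====
-- def incorrectAnswer(n, m , N, S):
--     R = 0
--     currentN = True #added this flag to maintain moving cost in algorithm
--     for i in range(n):
--         if N[i] < S[i]:
--             R += N[i]
--             if not currentN:
--                 currentN = True
--                 R += m
--         else:
--             R += S[i]
--             if currentN:
--                 currentN = False
--                 R += m
--
--     return R
-- ===== SOURCE B (Python) =====
-- def incorrectAnswer(n, m, N, S):
--     # Cost of the chosen elements is just the elementwise minimum (ties pick the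
--     # equal S value, same number).  Switch penalties: the walk starts on N, so each
--     # maximal block of indices where S wins costs 2*m (enter + leave), except a
--     # block that runs to the end, which costs only m.  Count block starts directly.
--     base = sum(min(N[i], S[i]) for i in range(n))
--     blocks = sum(1 for i in range(n)
--                  if N[i] >= S[i] and (i == 0 or N[i - 1] < S[i - 1]))
--     tail = 1 if n > 0 and N[n - 1] >= S[n - 1] else 0
--     return base + m * (2 * blocks - tail)
-- ===== Notes on version B (the rewrite author's own statement) =====
-- stated objective: alternative
-- what changed: Instead of a stateful pass tracking the current source, B sums the elementwise minima and accounts penalties per maximal block of S-winning indices (2*m per block, m less if the block reaches the end), counting block starts by an index-0-or-previous test.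
import Mathlib
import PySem

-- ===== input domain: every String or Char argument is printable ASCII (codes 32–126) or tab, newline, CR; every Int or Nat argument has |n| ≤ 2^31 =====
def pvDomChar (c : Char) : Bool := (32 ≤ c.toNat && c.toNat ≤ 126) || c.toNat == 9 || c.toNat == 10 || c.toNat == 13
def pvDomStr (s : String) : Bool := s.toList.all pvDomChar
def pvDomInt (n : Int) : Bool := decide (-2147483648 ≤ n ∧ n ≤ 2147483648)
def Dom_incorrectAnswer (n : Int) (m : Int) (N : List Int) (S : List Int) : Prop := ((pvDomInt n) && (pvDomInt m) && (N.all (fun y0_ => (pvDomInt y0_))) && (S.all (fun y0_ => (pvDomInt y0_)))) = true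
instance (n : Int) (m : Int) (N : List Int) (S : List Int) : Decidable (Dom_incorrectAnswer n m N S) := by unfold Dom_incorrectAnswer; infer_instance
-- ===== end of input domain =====

-- B replaces A's stateful source-tracking pass by summing elementwise minima and charging
-- penalties per maximal S-winning block (2m per block, m less for a block reaching the end);
-- alternative decomposition, same cost.


-- xs[i] for i drawn from range(n); inside Pre_ every index is in range, so the
-- getD 0 default is never the value used.
def pvGd (xs : List Int) (i : Int) : Int := (PySem.List.pyGet? xs i).getD 0

-- ===== PORT A =====
def incorrectAnswer (n : Int) (m : Int) (N : List Int) (S : List Int) : Int :=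
  ((PySem.List.pyRange 0 n 1).foldl
    (fun (st : Int × Bool) i =>
      if pvGd N i < pvGd S i then
        (st.1 + pvGd N i + (if !st.2 then m else 0), true)
      else
        (st.1 + pvGd S i + (if st.2 then m else 0), false))
    (0, true)).1

-- ===== PORT B =====
-- Source B's block-start test, as a named Bool predicate
def pvBlockStart (N S : List Int) (i : Int) : Bool :=
  decide (pvGd S i ≤ pvGd N i ∧ (i = 0 ∨ pvGd N (i - 1) < pvGd S (i - 1)))

def incorrectAnswer_alt (n : Int) (m : Int) (N : List Int) (S : List Int) : Int :=
  let base := ((PySem.List.pyRange 0 n 1).map (fun i => min (pvGd N i) (pvGd S i))).sum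
  let blocks := ((PySem.List.pyRange 0 n 1).filter (pvBlockStart N S)).length
  let tail : Int := if 0 < n ∧ pvGd S (n - 1) ≤ pvGd N (n - 1) then 1 else 0
  base + m * (2 * (blocks : Int) - tail)

-- ===== PRECONDITION & SPEC =====
-- Pre_ excludes exactly the inputs where A raises IndexError: n exceeding a list length.
def Pre_incorrectAnswer (n : Int) (m : Int) (N : List Int) (S : List Int) : Prop :=
  n ≤ (N.length : Int) ∧ n ≤ (S.length : Int)
instance (n : Int) (m : Int) (N : List Int) (S : List Int) : Decidable (Pre_incorrectAnswer n m N S) := by unfold Pre_incorrectAnswer; infer_instance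

def pvWitness_incorrectAnswer : Int × Int × List Int × List Int := (3, 2, [1, 5, 2], [4, 3, 3])

def Spec_incorrectAnswer (n : Int) (m : Int) (N : List Int) (S : List Int) (out : Int) : Prop := out = incorrectAnswer_alt n m N S
instance (n : Int) (m : Int) (N : List Int) (S : List Int) (out : Int) : Decidable (Spec_incorrectAnswer n m N S out) := by unfold Spec_incorrectAnswer; infer_instance

-- ===== CLAIM (what is proved, stated in full; the proofs are below) =====
def Claim_equal_incorrectAnswer : Prop := ∀ (n : Int) (m : Int) (N : List Int) (S : List Int), Dom_incorrectAnswer n m N S → Pre_incorrectAnswer n m N S → Spec_incorrectAnswer n m N S (incorrectAnswer n m N S)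

-- ===== LEMMAS AND PROOFS =====

-- after processing range(k), A's source flag is "k = 0 or N[k-1] < S[k-1]"
def pvLast (N S : List Int) (k : Nat) : Bool :=
  if k = 0 then true else decide (pvGd N ((k : Int) - 1) < pvGd S ((k : Int) - 1))

-- the loop invariant: A's fold over range(k) equals (B's formula at k, pvLast k)
theorem pvKey (m : Int) (N S : List Int) : ∀ k : Nat,
    ((PySem.List.pyRange 0 (k : Int) 1).foldl
      (fun (st : Int × Bool) i =>
        if pvGd N i < pvGd S i then
          (st.1 + pvGd N i + (if !st.2 then m else 0), true)
        else
          (st.1 + pvGd S i + (if st.2 then m else 0), false))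
      (0, true))
    = (((PySem.List.pyRange 0 (k : Int) 1).map (fun i => min (pvGd N i) (pvGd S i))).sum
        + m * (2 * ((((PySem.List.pyRange 0 (k : Int) 1).filter (pvBlockStart N S)).length : Int))
          - (if 0 < (k : Int) ∧ pvGd S ((k : Int) - 1) ≤ pvGd N ((k : Int) - 1) then 1 else 0)),
        pvLast N S k) := by
  intro k
  induction k with
  | zero => simp [PySem.List.pyRange_one_eq_nil, pvLast]
  | succ k ih =>
      have hk1 : ((k + 1 : Nat) : Int) - 1 = (k : Int) := by push_cast; ring
      have hpos1 : (0 : Int) < ((k + 1 : Nat) : Int) := by positivity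
      have hsplit : PySem.List.pyRange 0 ((k + 1 : Nat) : Int) 1
          = PySem.List.pyRange 0 (k : Int) 1 ++ [(k : Int)] := by
        have := PySem.List.pyRange_one_succ_right (a := 0) (b := (k : Int)) (by positivity)
        push_cast
        convert this using 2
      have hlast1 : pvLast N S (k + 1) = decide (pvGd N (k : Int) < pvGd S (k : Int)) := by
        simp only [pvLast, Nat.succ_ne_zero, if_false, hk1]
      have htail : (if 0 < (k : Int) ∧ pvGd S ((k : Int) - 1) ≤ pvGd N ((k : Int) - 1)
            then (1 : Int) else 0) = (if pvLast N S k = true then 0 else 1) := by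
        rcases Nat.eq_zero_or_pos k with hk0 | hkpos
        · subst hk0; simp [pvLast]
        · have h0 : (0 : Int) < (k : Int) := by exact_mod_cast hkpos
          have hne : k ≠ 0 := Nat.pos_iff_ne_zero.mp hkpos
          simp only [pvLast, hne, if_false]
          by_cases hc : pvGd N ((k : Int) - 1) < pvGd S ((k : Int) - 1)
          · simp [hc, not_le.mpr hc]
          · simp [hc, not_lt.mp hc, hne]
      rw [hsplit, List.foldl_append, List.map_append, List.filter_append, ih, htail]
      simp only [List.foldl_cons, List.foldl_nil, List.map_cons, List.map_nil,
        List.sum_append, List.sum_cons, List.sum_nil, List.filter_cons, List.filter_nil,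
        List.length_append, hk1, hlast1, hpos1, true_and]
      by_cases hu : pvGd N (k : Int) < pvGd S (k : Int)
      · -- element k is taken from N: flag true, no new block, no tail correction at k+1
        have hP : pvBlockStart N S (k : Int) = false := by
          simp [pvBlockStart, not_le.mpr hu]
        rw [if_pos hu]
        by_cases hl : pvLast N S k = true
        · simp [hP, hl, hu, not_le.mpr hu, min_eq_left (le_of_lt hu), Prod.mk.injEq]
          ring
        · have hl' : pvLast N S k = false := by
            cases h : pvLast N S k with
            | false => rfl
            | true => exact absurd h hl
          simp [hP, hl', hu, not_le.mpr hu, min_eq_left (le_of_lt hu), Prod.mk.injEq]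
          ring
      · -- element k is taken from S: flag false, tail correction at k+1 is 1
        have hmin : min (pvGd N (k : Int)) (pvGd S (k : Int)) = pvGd S (k : Int) :=
          min_eq_right (not_lt.mp hu)
        rw [if_neg hu]
        by_cases hl : pvLast N S k = true
        · -- a new block starts at k
          have hP : pvBlockStart N S (k : Int) = true := by
            rcases Nat.eq_zero_or_pos k with hk0 | hkpos
            · subst hk0
              simp [pvBlockStart]
              exact_mod_cast not_lt.mp hu
            · have : pvGd N ((k : Int) - 1) < pvGd S ((k : Int) - 1) := by
                simpa [pvLast, Nat.pos_iff_ne_zero.mp hkpos] using hl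
              simp [pvBlockStart, not_lt.mp hu, this]
          simp [hP, hl, hu, not_lt.mp hu, Prod.mk.injEq]
          ring
        · -- still inside an S block
          have hl' : pvLast N S k = false := by
            cases h : pvLast N S k with
            | false => rfl
            | true => exact absurd h hl
          have hkne : k ≠ 0 := by
            rintro rfl; simp [pvLast] at hl'
          have hge : pvGd S ((k : Int) - 1) ≤ pvGd N ((k : Int) - 1) := by
            have := hl'
            simp only [pvLast, hkne, if_false, decide_eq_false_iff_not] at this
            exact not_lt.mp this
          have hP : pvBlockStart N S (k : Int) = false := by
            simp [pvBlockStart, not_lt.mpr hge]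
            intro _
            exact hkne
          simp [hP, hl', hu, not_lt.mp hu, Prod.mk.injEq]
          ring

-- ===== VERDICT (by name: the statement is the Claim_ definition above) =====
theorem incorrectAnswer_spec : Claim_equal_incorrectAnswer := by
  intro n m N S _ _
  show incorrectAnswer n m N S = incorrectAnswer_alt n m N S
  unfold incorrectAnswer incorrectAnswer_alt
  by_cases hn : n ≤ 0
  · simp [PySem.List.pyRange_one_eq_nil hn, not_lt.mpr hn]
  · have hk : n = ((n.toNat : Nat) : Int) := by omega
    rw [hk, pvKey]
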